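-- pv_equiv track=rewrite | github.com/nixternal/CodingChallenges | Codyssi/2025/04.py | part_two
-- ===== SOURCE A (Python) =====
-- def calculate_memory_units(data: list) -> int:
--     """
--     Calculate the total "memory units" for a list of strings.
--
--     For each character:
--     - If it's a letter: Convert to memory units by subtracting 64 from its
--       ASCII value (e.g., 'A' = 1, 'B' = 2, etc.)
--     - If it's a digit: Use the digit's numeric value
--
--     Args:
--         data (list): A list of strings to process
--
--     Returns:
--         int: The total memory units calculated from all characters
--     """
--
--     memory_units = 0
--
--     for line in data:
--         for char in line:
--             # Calculate memory units based on character type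
--             if char.isalpha():
--                 # Convert letters to values (A=1, B=2, etc.)
--                 memory_units += ord(char) - 64
--             else:
--                 # Use numeric value for digits
--                 memory_units += int(char)
--
--     return memory_units
--
-- def part_two(data: list) -> int:
--     """
--     Part 2 solution: Compress data by keeping the first and last 10% of each
--     line, replacing the middle with the count of removed characters.
--
--     Example:
--     "ABCDEFGHIJ" becomes "A8J" (keep first and last character, 8 removed from
--     middle)
--
--     Args:
--         data (list): The raw input data
--
--     Returns:
--         int: Total memory units from the compressed data
--     """
--
--     compressed_message = []
--
--     for line in data:
--         # Calculate how many characters to keep at each end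
--         keep = max(1, len(line) // 10)
--
--         # Create the compressed line
--         # Format:
--         # [first keep chars][count of middle removed chars][last keep chars]
--         middle_removed = len(line) - (keep * 2)
--         new_line = f"{line[:keep]}{middle_removed}{line[-keep:]}"
--
--         compressed_message.append(new_line)
--
--     return calculate_memory_units(compressed_message)
-- ===== SOURCE B (Python) =====
-- def part_two(data: list) -> int:
--     """Single running total, no compressed strings: each line is scanned once by
--     index (a character counts iff its index lies in the first or last `keep`
--     positions), then the digits of str(middle) are added without ever
--     concatenating them into a compressed line."""
--     total = 0
--     for line in data:
--         n = len(line)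
--         keep = max(1, n // 10)
--         for i, c in enumerate(line):
--             if i < keep or i >= n - keep:
--                 total += ord(c) - 64 if c.isalpha() else int(c)
--         for d in str(n - 2 * keep):
--             total += int(d)
--     return total
-- ===== Notes on version B (the rewrite author's own statement) =====
-- stated objective: alternative
-- what changed: B never builds the compressed strings or the compressed_message list: it keeps one running total, scans each line once by index (a character counts iff its index is among the first or last `keep` positions, instead of slicing and concatenating), and adds the digits of str(middle) directly in the same pass.
import Mathlib
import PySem

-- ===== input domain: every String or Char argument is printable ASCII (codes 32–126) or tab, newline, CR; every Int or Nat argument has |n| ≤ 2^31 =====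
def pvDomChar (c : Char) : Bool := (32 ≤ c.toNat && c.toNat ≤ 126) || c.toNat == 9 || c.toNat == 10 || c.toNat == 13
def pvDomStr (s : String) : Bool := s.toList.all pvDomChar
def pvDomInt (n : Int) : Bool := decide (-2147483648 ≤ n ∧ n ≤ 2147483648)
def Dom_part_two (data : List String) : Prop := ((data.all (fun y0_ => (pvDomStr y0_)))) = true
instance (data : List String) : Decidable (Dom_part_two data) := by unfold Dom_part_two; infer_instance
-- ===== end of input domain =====

-- B keeps one running total, scans each line once by index and adds str(middle)'s digits
-- directly, never building the compressed strings (objective: alternative).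

-- ===== PORT A =====
-- memory value of one character: ord(c)-64 if alpha else int(c); int(c) raises on a
-- non-digit — Pre_part_two excludes those inputs, the port totalizes with getD 0
def pvMemVal (c : Char) : Int :=
  if PySem.Chars.isalpha c then (c.toNat : Int) - 64
  else (PySem.Int.ofChars? [c]).getD 0

def pvCalculateMemoryUnits (data : List String) : Int :=
  data.foldl (fun memory_units line =>
    line.toList.foldl (fun memory_units char => memory_units + pvMemVal char) memory_units) 0

def part_two (data : List String) : Int :=
  let compressed_message : List String :=
    data.foldl (fun compressed_message line =>
      let keep : Int := max 1 (PySem.Int.floordiv (PySem.Str.len line) 10)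
      let middle_removed : Int := PySem.Str.len line - keep * 2
      let new_line : String := String.ofList
        (PySem.List.slice line.toList none (some keep)
          ++ PySem.Int.toChars middle_removed
          ++ PySem.List.slice line.toList (some (-keep)) none)
      compressed_message ++ [new_line]) []
  pvCalculateMemoryUnits compressed_message

-- ===== PORT B =====
-- int(d) for one digit character of str(middle); getD 0 never fires on a decimal digit
def pvIntVal (c : Char) : Int := (PySem.Int.ofChars? [c]).getD 0

def part_two_alt (data : List String) : Int :=
  data.foldl (fun total line =>
    let n : Int := PySem.Str.len line
    let keep : Int := max 1 (PySem.Int.floordiv n 10)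
    let total :=
      (PySem.List.enumerate line.toList 0).foldl
        (fun t ic => if ic.1 < keep ∨ n - keep ≤ ic.1 then t + pvMemVal ic.2 else t) total
    (PySem.Int.toChars (n - 2 * keep)).foldl (fun t d => t + pvIntVal d) total) 0

-- ===== PRECONDITION & SPEC =====
-- Pre_ excludes exactly the inputs where the Python A raises ValueError: a line shorter
-- than 2 characters (str(middle) then contains '-') or a kept end character that is
-- neither a letter nor a digit (int(char) raises).
def pvLineOK (line : String) : Bool :=
  let cs := line.toList
  let n := cs.length
  let k := max 1 (n / 10)
  decide (2 ≤ n) &&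
    (cs.take k ++ cs.drop (n - k)).all (fun c => PySem.Chars.isalpha c || PySem.Chars.isdigit c)

def Pre_part_two (data : List String) : Prop := data.all pvLineOK = true
instance (data : List String) : Decidable (Pre_part_two data) := by unfold Pre_part_two; infer_instance

def pvWitness_part_two : List String := ["ABCDEFGHIJ", "Q7"]

def Spec_part_two (data : List String) (out : Int) : Prop := out = part_two_alt data
instance (data : List String) (out : Int) : Decidable (Spec_part_two data out) := by unfold Spec_part_two; infer_instance

-- ===== CLAIM (what is proved, stated in full; the proofs are below) =====
def Claim_equal_part_two : Prop := ∀ (data : List String), Dom_part_two data → Pre_part_two data → Spec_part_two data (part_two data)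

-- ===== LEMMAS AND PROOFS =====

def pvUnits (cs : List Char) : Int := (cs.map pvMemVal).sum

-- the per-line value A contributes
def pvLineVal (line : String) : Int :=
  pvUnits (PySem.List.slice line.toList none (some (max 1 (PySem.Int.floordiv (PySem.Str.len line) 10))))
    + pvUnits (PySem.Int.toChars (PySem.Str.len line - (max 1 (PySem.Int.floordiv (PySem.Str.len line) 10)) * 2))
    + pvUnits (PySem.List.slice line.toList (some (-(max 1 (PySem.Int.floordiv (PySem.Str.len line) 10)))) none)

def pvDigsum (M : Nat) : Int := ((Nat.digits 10 M).map (Int.ofNat)).sum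

-- ---- A side: part_two as a sum of per-line values ----

theorem pvCalc_eq_sum (data : List String) :
    pvCalculateMemoryUnits data = (data.map (fun s => pvUnits s.toList)).sum := by
  have h : ∀ (l : List String) (t : Int),
      l.foldl (fun memory_units line =>
        line.toList.foldl (fun m c => m + pvMemVal c) memory_units) t
      = t + (l.map (fun s => pvUnits s.toList)).sum := by
    intro l
    induction l with
    | nil => intro t; simp
    | cons line rest ih =>
        intro t
        rw [List.foldl_cons, ih, List.map_cons, List.sum_cons, PySem.List.foldl_add]
        simp only [pvUnits]
        ring
  simpa [pvCalculateMemoryUnits] using h data 0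

theorem pvA_eq_sum (data : List String) : part_two data = (data.map pvLineVal).sum := by
  simp only [part_two]
  rw [PySem.List.foldl_append_singleton_eq_map, pvCalc_eq_sum]
  simp only [List.nil_append, List.map_map]
  refine congrArg List.sum (List.map_congr_left ?_)
  intro line _
  simp only [Function.comp_apply, String.toList_ofList, pvLineVal, pvUnits,
    List.map_append, List.sum_append, add_assoc]

-- ---- digit sums ----

theorem pvMemVal_digitChar (d : Nat) (h : d < 10) : pvMemVal (Nat.digitChar d) = (d : Int) := by
  interval_cases d <;> decide

theorem pvIntVal_digitChar (d : Nat) (h : d < 10) : pvIntVal (Nat.digitChar d) = (d : Int) := by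
  interval_cases d <;> decide

theorem pvDigsum_lt_ten (n : Nat) (h : n < 10) : pvDigsum n = (n : Int) := by
  rcases Nat.eq_zero_or_pos n with h0 | h0
  · subst h0; simp [pvDigsum]
  · rw [pvDigsum, Nat.digits_def' (by omega : 1 < 10) h0]
    have : n / 10 = 0 := by omega
    rw [this]
    simp
    omega

theorem pvDigsum_pos (n : Nat) (h : 0 < n) :
    pvDigsum n = ((n % 10 : Nat) : Int) + pvDigsum (n / 10) := by
  rw [pvDigsum, Nat.digits_def' (by omega : 1 < 10) h, List.map_cons, List.sum_cons]
  rfl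

theorem pvSum_toDigitsCore (v : Char → Int) (hv : ∀ d : Nat, d < 10 → v (Nat.digitChar d) = (d : Int))
    (f : Nat) : ∀ (n : Nat) (acc : List Char), n < f →
    ((Nat.toDigitsCore 10 f n acc).map v).sum = pvDigsum n + (acc.map v).sum := by
  induction f with
  | zero => intro n acc h; omega
  | succ f ih =>
      intro n acc h
      rw [Nat.toDigitsCore]
      by_cases h0 : n / 10 = 0
      · rw [if_pos h0]
        have hn : n < 10 := by omega
        rw [List.map_cons, List.sum_cons, hv (n % 10) (by omega),
          pvDigsum_lt_ten n hn, Nat.mod_eq_of_lt hn]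
      · rw [if_neg h0]
        rw [ih (n / 10) _ (by omega)]
        rw [List.map_cons, List.sum_cons, hv (n % 10) (by omega)]
        rw [pvDigsum_pos n (by omega)]
        ring

theorem pvVal_toChars (v : Char → Int) (hv : ∀ d : Nat, d < 10 → v (Nat.digitChar d) = (d : Int))
    (M : Nat) : ((PySem.Int.toChars (M : Int)).map v).sum = pvDigsum M := by
  have : PySem.Int.toChars (M : Int) = Nat.toDigits 10 M := by
    simp [PySem.Int.toChars]
  rw [this, Nat.toDigits, pvSum_toDigitsCore v hv (M + 1) M [] (by omega)]
  simp

-- ---- the conditional enumerate fold ----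

theorem pvFoldIf (cond : Int × Char → Prop) [DecidablePred cond] :
    ∀ (l : List (Int × Char)) (t : Int),
      l.foldl (fun t ic => if cond ic then t + pvMemVal ic.2 else t) t
        = t + (l.map (fun ic => if cond ic then pvMemVal ic.2 else 0)).sum := by
  intro l
  induction l with
  | nil => intro t; simp
  | cons p rest ih =>
      intro t
      rw [List.foldl_cons, ih, List.map_cons, List.sum_cons]
      split_ifs <;> ring

theorem pvChunkTrue (cond : Int × Char → Prop) [DecidablePred cond] (xs : List Char) (s : Int)
    (h : ∀ p ∈ PySem.List.enumerate xs s, cond p) :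
    ((PySem.List.enumerate xs s).map (fun ic => if cond ic then pvMemVal ic.2 else 0)).sum
      = pvUnits xs := by
  rw [List.map_congr_left (fun p hp => by rw [if_pos (h p hp)])]
  show (List.map ((fun c => pvMemVal c) ∘ (fun ic => ic.2)) (PySem.List.enumerate xs s)).sum = _
  rw [← List.map_map, PySem.List.map_snd_enumerate, pvUnits]

theorem pvChunkFalse (cond : Int × Char → Prop) [DecidablePred cond] (xs : List Char) (s : Int)
    (h : ∀ p ∈ PySem.List.enumerate xs s, ¬ cond p) :
    ((PySem.List.enumerate xs s).map (fun ic => if cond ic then pvMemVal ic.2 else 0)).sum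
      = 0 := by
  rw [List.map_congr_left (fun p hp => by rw [if_neg (h p hp)])]
  simp

-- ---- the per-line core: B's scan+digit-loop equals A's per-line value ----

theorem pvLine_core (line : String) (h2 : 2 ≤ line.toList.length) (t : Int) :
    (let n : Int := PySem.Str.len line
     let keep : Int := max 1 (PySem.Int.floordiv n 10)
     (PySem.Int.toChars (n - 2 * keep)).foldl (fun t d => t + pvIntVal d)
       ((PySem.List.enumerate line.toList 0).foldl
         (fun t ic => if ic.1 < keep ∨ n - keep ≤ ic.1 then t + pvMemVal ic.2 else t) t))
    = t + pvLineVal line := by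
  set cs := line.toList with hcs
  set N := cs.length with hN
  set K := max 1 (N / 10) with hK
  have hKN : 2 * K ≤ N := by omega
  have hn : PySem.Str.len line = (N : Int) := by rw [PySem.Str.len_eq]
  have hkeep : max 1 (PySem.Int.floordiv ((N : Nat) : Int) 10) = (K : Int) := by
    rw [PySem.Int.floordiv_eq_ediv_of_pos (by omega : (0:Int) < 10)]
    have hq : (N : Int) / 10 = ((N / 10 : Nat) : Int) := by omega
    rw [hq, hK]
    push_cast
    omega
  simp only [hn, hkeep]
  -- the scanned middle count
  have hmid : (N : Int) - 2 * (K : Int) = ((N - 2 * K : Nat) : Int) := by omega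
  -- split the line into the three chunks
  have hsplit : cs = cs.take K ++ ((cs.drop K).take (N - 2 * K) ++ cs.drop (N - K)) := by
    have h1 : cs.drop K = (cs.drop K).take (N - 2 * K) ++ (cs.drop K).drop (N - 2 * K) :=
      (List.take_append_drop _ _).symm
    have h2' : (cs.drop K).drop (N - 2 * K) = cs.drop (N - K) := by
      rw [List.drop_drop]
      congr 1
      omega
    rw [← h2', ← h1, List.take_append_drop]
  have hlen1 : (cs.take K).length = K := by
    rw [List.length_take]
    omega
  have hlen2 : ((cs.drop K).take (N - 2 * K)).length = N - 2 * K := by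
    rw [List.length_take, List.length_drop]
    omega
  rw [pvFoldIf]
  conv_lhs => rw [hsplit]
  rw [PySem.List.enumerate_append, PySem.List.enumerate_append,
    List.map_append, List.map_append, List.sum_append, List.sum_append,
    hlen1, hlen2]
  rw [pvChunkTrue _ (cs.take K) 0 ?ha, pvChunkFalse _ ((cs.drop K).take (N - 2 * K)) _ ?hb,
    pvChunkTrue _ (cs.drop (N - K)) _ ?hc]
  case ha =>
    intro p hp
    rw [PySem.List.mem_enumerate_iff] at hp
    obtain ⟨j, hj, rfl⟩ := hp
    rw [hlen1] at hj
    left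
    simp only
    omega
  case hb =>
    intro p hp
    rw [PySem.List.mem_enumerate_iff] at hp
    obtain ⟨j, hj, rfl⟩ := hp
    rw [hlen2] at hj
    simp only
    omega
  case hc =>
    intro p hp
    rw [PySem.List.mem_enumerate_iff] at hp
    obtain ⟨j, hj, rfl⟩ := hp
    right
    simp only
    omega
  rw [hmid, PySem.List.foldl_add, pvVal_toChars pvIntVal pvIntVal_digitChar]
  -- now rewrite A's per-line value into the same three pieces
  rw [pvLineVal, ← hcs, hn, hkeep]
  rw [PySem.List.slice_to_natCast]
  rw [PySem.List.slice_from_neg_natCast cs K (by omega)]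
  have hmid' : (N : Int) - (K : Int) * 2 = ((N - 2 * K : Nat) : Int) := by omega
  rw [hmid', ← hN,
    show pvUnits (PySem.Int.toChars ((N - 2 * K : Nat) : Int)) = pvDigsum (N - 2 * K) from
      pvVal_toChars pvMemVal pvMemVal_digitChar (N - 2 * K)]
  ring

-- ---- B as the same sum ----

theorem pvB_eq_sum (data : List String) (hpre : ∀ line ∈ data, pvLineOK line = true) :
    part_two_alt data = (data.map pvLineVal).sum := by
  simp only [part_two_alt]
  have h : ∀ (l : List String), (∀ line ∈ l, pvLineOK line = true) → ∀ (t : Int),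
      l.foldl (fun total line =>
        let n : Int := PySem.Str.len line
        let keep : Int := max 1 (PySem.Int.floordiv n 10)
        let total :=
          (PySem.List.enumerate line.toList 0).foldl
            (fun t ic => if ic.1 < keep ∨ n - keep ≤ ic.1 then t + pvMemVal ic.2 else t) total
        (PySem.Int.toChars (n - 2 * keep)).foldl (fun t d => t + pvIntVal d) total) t
      = t + (l.map pvLineVal).sum := by
    intro l
    induction l with
    | nil => intro _ t; simp
    | cons line rest ih =>
        intro hok t
        have h2 : 2 ≤ line.toList.length := by
          have := hok line (List.mem_cons_self ..)
          rw [pvLineOK] at this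
          simp only [Bool.and_eq_true, decide_eq_true_eq] at this
          exact this.1
        rw [List.foldl_cons, List.map_cons, List.sum_cons]
        rw [ih (fun l hl => hok l (List.mem_cons_of_mem _ hl))]
        rw [pvLine_core line h2 t]
        ring
  rw [h data hpre 0, zero_add]

-- ===== VERDICT (by name: the statement is the Claim_ definition above) =====
theorem part_two_spec : Claim_equal_part_two := by
  intro data _ hpre
  show part_two data = part_two_alt data
  rw [pvA_eq_sum, pvB_eq_sum data (fun l hl => by
    rw [Pre_part_two, List.all_eq_true] at hpre
    exact hpre l hl)]
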